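-- pv_equiv track=rewrite | github.com/tanjingjing123/LeetcodeAlgorithms | seqReconstruction.py | seqReconstruction
-- ===== SOURCE A (Python) =====
-- import collections
--
-- def seqReconstruction(org, seqs):
--     num_set = {x for seq in seqs for x in seq}
--     n = len(num_set)
--     if n != len(org):
--         return False
--     indeg = {x: 0 for x in num_set}
--     graph = collections.defaultdict(set)
--     for lis in seqs:
--         for i in range(len(lis) - 1):
--             x, y = lis[i], lis[i+1]
--             if y not in graph[x]:
--                 graph[x].add(y)
--                 indeg[y] += 1
--
--     q = [k for k in indeg if indeg[k] == 0]
--     res = []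
--
--     while len(q) == 1:
--         res.append(q.pop())
--         for x in graph[res[-1]]:
--             indeg[x] -= 1
--             if indeg[x] == 0:
--                 q.append(x)
--     return res == org
-- ===== SOURCE B (Python) =====
-- def seqReconstruction(org, seqs):
--     num_set = {x for seq in seqs for x in seq}
--     if len(num_set) != len(org):
--         return False
--     pos = {x: i for i, x in enumerate(org)}
--     seen = [False] * (len(org) - 1)
--     for seq in seqs:
--         for x in seq:
--             if x not in pos:
--                 return False
--         for a, b in zip(seq, seq[1:]):
--             if pos[a] >= pos[b]:
--                 return False
--             if pos[b] == pos[a] + 1: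
--                 seen[pos[a]] = True
--     return all(seen)
-- ===== Notes on version B (the rewrite author's own statement) =====
-- stated objective: alternative
-- what changed: B replaces Kahn's topological sort with in-degree bookkeeping by a direct position-index check: it maps each value to its index in org and verifies that every seq element occurs in org, every consecutive seq pair is strictly increasing in org-position, and every adjacent org pair is witnessed as a consecutive pair of some seq.
import Mathlib
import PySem

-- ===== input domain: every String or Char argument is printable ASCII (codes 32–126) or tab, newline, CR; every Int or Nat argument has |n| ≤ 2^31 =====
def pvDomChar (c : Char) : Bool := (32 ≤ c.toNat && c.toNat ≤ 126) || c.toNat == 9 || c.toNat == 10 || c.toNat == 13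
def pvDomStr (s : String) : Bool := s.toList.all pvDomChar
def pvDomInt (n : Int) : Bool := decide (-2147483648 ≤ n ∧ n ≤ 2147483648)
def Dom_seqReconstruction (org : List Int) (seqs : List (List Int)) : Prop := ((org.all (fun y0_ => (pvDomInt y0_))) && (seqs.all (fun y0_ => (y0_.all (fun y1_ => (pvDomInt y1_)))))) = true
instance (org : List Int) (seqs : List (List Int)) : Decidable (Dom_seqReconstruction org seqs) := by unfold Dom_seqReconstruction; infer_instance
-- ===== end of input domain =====

-- B replaces Kahn's topological sort (A) by a position-index adjacency check; same O(V+E) cost, no speed claim.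

-- ===== PORT A =====
-- consecutive pairs of a list: the (lis[i], lis[i+1]) of `for i in range(len(lis)-1)`
def pvPairs (l : List Int) : List (Int × Int) := l.zip l.tail

-- body of the edge-building double loop: `if y not in graph[x]: graph[x].add(y); indeg[y] += 1`
def pvBuildStep (st : PySem.Dict Int (List Int) × PySem.Dict Int Int) (p : Int × Int) :
    PySem.Dict Int (List Int) × PySem.Dict Int Int :=
  if (st.1.getD p.1 []).contains p.2 then st
  else (st.1.insert p.1 (st.1.getD p.1 [] ++ [p.2]), st.2.insert p.2 (st.2.getD p.2 0 + 1))

-- the `while len(q) == 1` loop; fuel n+1 suffices: each element enters q at most once,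
-- so the Python loop runs at most n times.
def pvKahn : Nat → PySem.Dict Int (List Int) → PySem.Dict Int Int → List Int → List Int → List Int
  | 0, _, _, _, res => res
  | fuel+1, g, ind, q, res =>
    if q.length = 1 then
      let v := q.getLast!
      let res' := res ++ [v]
      let st := (g.getD v []).foldl (fun st x =>
          let ind2 := st.1.insert x (st.1.getD x 0 - 1)
          if ind2.getD x 0 == 0 then (ind2, st.2 ++ [x]) else (ind2, st.2)) (ind, ([] : List Int))
      pvKahn fuel g st.1 st.2 res'
    else res

def seqReconstruction (org : List Int) (seqs : List (List Int)) : Bool :=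
  let numSet : PySem.Set Int := PySem.Set.ofList (seqs.flatMap (fun s => s))
  let n := numSet.length
  if n ≠ org.length then false
  else
    let indeg0 : PySem.Dict Int Int := numSet.foldl (fun d x => d.insert x 0) PySem.Dict.empty
    let st := seqs.foldl (fun st lis => (pvPairs lis).foldl pvBuildStep st) (PySem.Dict.empty, indeg0)
    let q := st.2.keys.filter (fun k => st.2.getD k 0 == 0)
    let res := pvKahn (n + 1) st.1 st.2 q []
    res == org

-- ===== PORT B =====
-- `for a, b in zip(seq, seq[1:])`: check strictly increasing positions, mark adjacent org pairs
def pvGoPairs (pos : PySem.Dict Int Int) : List Bool → List (Int × Int) → Option (List Bool)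
  | seen, [] => some seen
  | seen, p :: rest =>
    let pa := pos.getD p.1 0
    let pb := pos.getD p.2 0
    if pb ≤ pa then none
    else if pb = pa + 1 then pvGoPairs pos (PySem.List.pySetD seen pa true) rest
    else pvGoPairs pos seen rest

-- outer `for seq in seqs` loop with its two early-returning inner loops
def pvGoSeqs (pos : PySem.Dict Int Int) : List Bool → List (List Int) → Option (List Bool)
  | seen, [] => some seen
  | seen, s :: rest =>
    if s.all (fun x => pos.contains x) then
      match pvGoPairs pos seen (s.zip s.tail) with
      | none => none
      | some seen' => pvGoSeqs pos seen' rest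
    else none

def seqReconstruction_alt (org : List Int) (seqs : List (List Int)) : Bool :=
  let numSet : PySem.Set Int := PySem.Set.ofList (seqs.flatMap (fun s => s))
  if numSet.length ≠ org.length then false
  else
    let pos : PySem.Dict Int Int :=
      (PySem.List.enumerate org).foldl (fun d p => d.insert p.2 p.1) PySem.Dict.empty
    let seen := List.replicate (org.length - 1) false
    match pvGoSeqs pos seen seqs with
    | none => false
    | some s => s.all (fun b => b)

-- ===== PRECONDITION & SPEC =====
def Spec_seqReconstruction (org : List Int) (seqs : List (List Int)) (out : Bool) : Prop := out = seqReconstruction_alt org seqs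
instance (org : List Int) (seqs : List (List Int)) (out : Bool) : Decidable (Spec_seqReconstruction org seqs out) := by unfold Spec_seqReconstruction; infer_instance

-- ===== CLAIM (what is proved, stated in full; the proofs are below) =====
def Claim_equal_seqReconstruction : Prop := ∀ (org : List Int) (seqs : List (List Int)), Dom_seqReconstruction org seqs → Spec_seqReconstruction org seqs (seqReconstruction org seqs)


-- ===== LEMMAS AND PROOFS =====

-- ---- common characterization ----
def pvXs (seqs : List (List Int)) : List Int := seqs.flatMap (fun s => s)
def pvS (seqs : List (List Int)) : List Int := PySem.Set.ofList (pvXs seqs)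
def pvP (seqs : List (List Int)) : List (Int × Int) := seqs.flatMap pvPairs

/-- org is the unique topological reconstruction: sizes match, org has no duplicates,
every seq element occurs in org, seq pairs go strictly forward in org, and every
adjacent org pair is witnessed by some seq pair. -/
def pvC (org : List Int) (seqs : List (List Int)) : Prop :=
  (pvS seqs).length = org.length ∧ org.Nodup ∧ (∀ x ∈ pvXs seqs, x ∈ org) ∧
  (∀ p ∈ pvP seqs, org.idxOf p.1 < org.idxOf p.2) ∧
  (∀ i : Nat, i + 1 < org.length → (org.getD i 0, org.getD (i+1) 0) ∈ pvP seqs)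

lemma pvP_mem_xs {seqs : List (List Int)} {p : Int × Int} (hp : p ∈ pvP seqs) :
    p.1 ∈ pvXs seqs ∧ p.2 ∈ pvXs seqs := by
  rcases List.mem_flatMap.1 hp with ⟨sq, hsq, hpq⟩
  have h1 := List.of_mem_zip hpq
  constructor
  · exact List.mem_flatMap.2 ⟨sq, hsq, h1.1⟩
  · exact List.mem_flatMap.2 ⟨sq, hsq, List.mem_of_mem_tail h1.2⟩

-- ---- B side ----
def pvPos (org : List Int) : PySem.Dict Int Int :=
  (PySem.List.enumerate org).foldl (fun d p => d.insert p.2 p.1) PySem.Dict.empty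

lemma pvPos_append (org : List Int) (a : Int) :
    pvPos (org ++ [a]) = (pvPos org).insert a (org.length : Int) := by
  unfold pvPos
  rw [PySem.List.enumerate_append]
  rw [List.foldl_append]
  simp [PySem.List.enumerate_cons]

/-- pos maps x to the index of its LAST occurrence in org. -/
lemma pvPos_get?_iff (org : List Int) (x : Int) (i : Int) :
    (pvPos org).get? x = some i ↔
    ∃ k : Nat, (k : Int) = i ∧ org[k]? = some x ∧ ∀ j : Nat, k < j → org[j]? ≠ some x := by
  induction org using List.reverseRecOn with
  | nil => simp [pvPos, PySem.List.enumerate]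
  | append_singleton org a ih =>
    rw [pvPos_append]
    by_cases hxa : x = a
    · subst hxa
      rw [PySem.Dict.get?_insert_self]
      constructor
      · rintro h
        refine ⟨org.length, by injection h, ?_, ?_⟩
        · simp
        · intro j hj
          have : org.length + 1 ≤ j := hj
          rw [List.getElem?_eq_none (by simp; omega)]
          simp
      · rintro ⟨k, hk, hget, hlast⟩
        have hkl : k < org.length + 1 := by
          by_contra h
          rw [List.getElem?_eq_none (by simp; omega)] at hget
          simp at hget
        have : k = org.length := by
          by_contra h
          have hk2 : k < org.length := by omega
          exact hlast org.length (by omega) (by simp)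
        subst this
        exact congrArg some hk
    · rw [PySem.Dict.get?_insert_of_ne _ _ (fun h => hxa h)]
      rw [ih]
      constructor
      · rintro ⟨k, hk, hget, hlast⟩
        have hkl : k < org.length := by
          by_contra h
          rw [List.getElem?_eq_none (by omega)] at hget
          simp at hget
        refine ⟨k, hk, ?_, ?_⟩
        · rw [List.getElem?_append_left hkl]; exact hget
        · intro j hj
          by_cases hjl : j < org.length
          · rw [List.getElem?_append_left hjl]; exact hlast j hj
          · by_cases hje : j = org.length
            · subst hje
              simp
              intro h; exact hxa h.symm
            · rw [List.getElem?_eq_none (by simp; omega)]; simp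
      · rintro ⟨k, hk, hget, hlast⟩
        have hkl : k < org.length + 1 := by
          by_contra h
          rw [List.getElem?_eq_none (by simp; omega)] at hget
          simp at hget
        have hkl2 : k < org.length := by
          by_contra h
          have : k = org.length := by omega
          subst this
          simp at hget
          exact hxa hget.symm
        refine ⟨k, hk, ?_, ?_⟩
        · rw [List.getElem?_append_left hkl2] at hget; exact hget
        · intro j hj
          have := hlast j hj
          by_cases hjl : j < org.length
          · rw [List.getElem?_append_left hjl] at this; exact this
          · rw [List.getElem?_eq_none (by omega)]; simp


lemma pvPos_exists_last {org : List Int} {x : Int} (h : x ∈ org) :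
    ∃ k : Nat, org[k]? = some x ∧ ∀ j : Nat, k < j → org[j]? ≠ some x := by
  induction org using List.reverseRecOn with
  | nil => simp at h
  | append_singleton org a ih =>
    by_cases hxa : x = a
    · subst hxa
      refine ⟨org.length, by simp, ?_⟩
      intro j hj
      rw [List.getElem?_eq_none (by simp; omega)]; simp
    · have hx : x ∈ org := by
        rcases List.mem_append.1 h with h1 | h1
        · exact h1
        · simp at h1; exact absurd h1 hxa
      rcases ih hx with ⟨k, hget, hlast⟩
      have hkl : k < org.length := by
        by_contra hc
        rw [List.getElem?_eq_none (by omega)] at hget; simp at hget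
      refine ⟨k, by rw [List.getElem?_append_left hkl]; exact hget, ?_⟩
      intro j hj
      by_cases hjl : j < org.length
      · rw [List.getElem?_append_left hjl]; exact hlast j hj
      · by_cases hje : j = org.length
        · subst hje; simp; intro hc; exact hxa hc.symm
        · rw [List.getElem?_eq_none (by simp; omega)]; simp

lemma pvPos_contains (org : List Int) (x : Int) :
    (pvPos org).contains x = true ↔ x ∈ org := by
  rw [PySem.Dict.contains_eq_isSome_get?]
  constructor
  · intro h
    rcases Option.isSome_iff_exists.1 h with ⟨i, hi⟩
    rcases (pvPos_get?_iff org x i).1 hi with ⟨k, _, hget, _⟩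
    exact List.mem_of_getElem? hget
  · intro h
    rcases pvPos_exists_last h with ⟨k, hget, hlast⟩
    rw [(pvPos_get?_iff org x (k : Int)).2 ⟨k, rfl, hget, hlast⟩]
    rfl

lemma pvPos_get?_nodup {org : List Int} (hnd : org.Nodup) {x : Int} (hx : x ∈ org) :
    (pvPos org).get? x = some (org.idxOf x : Int) := by
  refine (pvPos_get?_iff org x _).2 ⟨org.idxOf x, rfl, ?_, ?_⟩
  · rw [List.getElem?_eq_getElem (List.idxOf_lt_length_of_mem hx)]
    rw [List.getElem_idxOf]
  · intro j hj hget
    have hjl : j < org.length := by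
      by_contra hc
      rw [List.getElem?_eq_none (by omega)] at hget; simp at hget
    rw [List.getElem?_eq_getElem hjl] at hget
    have : org.idxOf org[j] = j := List.Nodup.idxOf_getElem hnd j hjl
    rw [Option.some_inj.1 hget] at this
    omega

lemma pvPos_getD_nodup {org : List Int} (hnd : org.Nodup) {x : Int} (hx : x ∈ org) :
    (pvPos org).getD x 0 = (org.idxOf x : Int) := by
  rw [PySem.Dict.getD_eq_get?_getD, pvPos_get?_nodup hnd hx]; rfl

lemma pvPos_value_index {org : List Int} {x i : Int}
    (h : (pvPos org).get? x = some i) :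
    ∃ k : Nat, (k : Int) = i ∧ org[k]? = some x := by
  rcases (pvPos_get?_iff org x i).1 h with ⟨k, hk, hget, _⟩
  exact ⟨k, hk, hget⟩

-- ---- B loop characterization ----
def pvMark (pos : PySem.Dict Int Int) (sn : List Bool) (p : Int × Int) : List Bool :=
  if pos.getD p.2 0 = pos.getD p.1 0 + 1 then PySem.List.pySetD sn (pos.getD p.1 0) true else sn

lemma pvGoPairs_eq_some_iff (pos : PySem.Dict Int Int) (seen : List Bool) (ps : List (Int × Int))
    (s : List Bool) :
    pvGoPairs pos seen ps = some s ↔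
      ((∀ p ∈ ps, pos.getD p.1 0 < pos.getD p.2 0) ∧ s = ps.foldl (pvMark pos) seen) := by
  induction ps generalizing seen with
  | nil =>
    show some seen = some s ↔ _
    simp [eq_comm]
  | cons p rest ih =>
    simp only [pvGoPairs]
    by_cases hle : pos.getD p.2 0 ≤ pos.getD p.1 0
    · rw [if_pos hle]
      constructor
      · intro h; simp at h
      · rintro ⟨h1, _⟩
        have := h1 p List.mem_cons_self
        omega
    · have hm : (if pos.getD p.2 0 = pos.getD p.1 0 + 1
            then pvGoPairs pos (PySem.List.pySetD seen (pos.getD p.1 0) true) rest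
            else pvGoPairs pos seen rest) = pvGoPairs pos (pvMark pos seen p) rest := by
        unfold pvMark
        split_ifs <;> rfl
      rw [if_neg hle, hm, ih, List.foldl_cons]
      constructor
      · rintro ⟨h1, h2⟩
        refine ⟨?_, h2⟩
        intro q hq
        rcases List.mem_cons.1 hq with rfl | hq
        · omega
        · exact h1 q hq
      · rintro ⟨h1, h2⟩
        exact ⟨fun q hq => h1 q (List.mem_cons_of_mem _ hq), h2⟩

lemma pvGoSeqs_eq_some_iff (pos : PySem.Dict Int Int) (seen : List Bool) (seqs : List (List Int))
    (s : List Bool) :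
    pvGoSeqs pos seen seqs = some s ↔
      ((∀ sq ∈ seqs, ∀ x ∈ sq, pos.contains x = true) ∧
       (∀ p ∈ pvP seqs, pos.getD p.1 0 < pos.getD p.2 0) ∧
       s = (pvP seqs).foldl (pvMark pos) seen) := by
  induction seqs generalizing seen with
  | nil =>
    show some seen = some s ↔ _
    constructor
    · intro h
      refine ⟨by simp, by simp [pvP], ?_⟩
      simpa [pvP] using (Option.some_inj.1 h).symm
    · rintro ⟨-, -, h⟩
      simp only [pvP, List.flatMap_nil, List.foldl_nil] at h
      rw [h]
  | cons sq rest ih =>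
    simp only [pvGoSeqs]
    have hP : pvP (sq :: rest) = pvPairs sq ++ pvP rest := by
      simp [pvP]
    by_cases hall : sq.all (fun x => pos.contains x) = true
    · rw [if_pos hall]
      rcases hgp : pvGoPairs pos seen (sq.zip sq.tail) with _ | seen'
      · simp only []
        constructor
        · intro h; simp at h
        · rintro ⟨h1, h2, h3⟩
          have : pvGoPairs pos seen (sq.zip sq.tail) = some ((pvPairs sq).foldl (pvMark pos) seen) := by
            rw [pvGoPairs_eq_some_iff]
            exact ⟨fun p hp => h2 p (by rw [hP]; exact List.mem_append_left _ hp), rfl⟩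
          rw [hgp] at this; simp at this
      · simp only []
        rw [ih]
        rcases (pvGoPairs_eq_some_iff pos seen (sq.zip sq.tail) seen').1 hgp with ⟨hinc, hseen'⟩
        rw [show sq.zip sq.tail = pvPairs sq from rfl] at hinc hseen'
        constructor
        · rintro ⟨h1, h2, h3⟩
          refine ⟨?_, ?_, ?_⟩
          · intro t ht x hx
            rcases List.mem_cons.1 ht with ht | ht
            · subst ht; exact List.all_eq_true.1 hall x hx
            · exact h1 t ht x hx
          · intro p hp
            rw [hP] at hp
            rcases List.mem_append.1 hp with hp | hp
            · exact hinc p hp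
            · exact h2 p hp
          · rw [hP, List.foldl_append, ← hseen']; exact h3
        · rintro ⟨h1, h2, h3⟩
          refine ⟨?_, ?_, ?_⟩
          · exact fun t ht x hx => h1 t (List.mem_cons_of_mem _ ht) x hx
          · intro p hp
            exact h2 p (by rw [hP]; exact List.mem_append_right _ hp)
          · rw [hP, List.foldl_append, ← hseen'] at h3; exact h3
    · rw [if_neg hall]
      constructor
      · intro h; simp at h
      · rintro ⟨h1, _, _⟩
        exact absurd (List.all_eq_true.2 (h1 sq (List.mem_cons_self))) hall

lemma pvPos_getD_nonneg (org : List Int) (x : Int) : 0 ≤ (pvPos org).getD x 0 := by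
  rw [PySem.Dict.getD_eq_get?_getD]
  rcases h : (pvPos org).get? x with _ | i
  · simp
  · rcases pvPos_value_index h with ⟨k, hk, _⟩
    simp [← hk]

lemma pvMark_length {pos : PySem.Dict Int Int} (hnn : ∀ x, 0 ≤ pos.getD x 0)
    (sn : List Bool) (p : Int × Int) : (pvMark pos sn p).length = sn.length := by
  unfold pvMark
  split_ifs
  · rw [PySem.List.pySetD_of_nonneg _ _ (hnn _), List.length_set]
  · rfl

lemma pvFoldMark_length {pos : PySem.Dict Int Int} (hnn : ∀ x, 0 ≤ pos.getD x 0)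
    (ps : List (Int × Int)) (seen : List Bool) :
    (ps.foldl (pvMark pos) seen).length = seen.length := by
  induction ps generalizing seen with
  | nil => rfl
  | cons p rest ih => rw [List.foldl_cons, ih, pvMark_length hnn]

lemma pvMark_getD {pos : PySem.Dict Int Int} (hnn : ∀ x, 0 ≤ pos.getD x 0)
    (sn : List Bool) (p : Int × Int) (i : Nat) (hi : i < sn.length) :
    ((pvMark pos sn p).getD i false = true) ↔
      (sn.getD i false = true ∨
        (pos.getD p.2 0 = pos.getD p.1 0 + 1 ∧ pos.getD p.1 0 = (i : Int))) := by
  unfold pvMark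
  split_ifs with hadj
  · rw [PySem.List.pySetD_of_nonneg _ _ (hnn _)]
    rw [List.getD_eq_getElem?_getD, List.getElem?_set]
    by_cases he : (pos.getD p.1 0).toNat = i
    · have hpi : pos.getD p.1 0 = (i : Int) := by have := hnn p.1; omega
      rw [if_pos he]
      simp [hi, hpi, hadj]
    · have hpi : ¬ pos.getD p.1 0 = (i : Int) := by have := hnn p.1; omega
      rw [if_neg he, ← List.getD_eq_getElem?_getD]
      simp [hpi, hadj]
  · simp [hadj]

lemma pvFoldMark_getD {pos : PySem.Dict Int Int} (hnn : ∀ x, 0 ≤ pos.getD x 0)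
    (ps : List (Int × Int)) (seen : List Bool) (i : Nat) (hi : i < seen.length) :
    ((ps.foldl (pvMark pos) seen).getD i false = true) ↔
      (seen.getD i false = true ∨
        ∃ p ∈ ps, pos.getD p.2 0 = pos.getD p.1 0 + 1 ∧ pos.getD p.1 0 = (i : Int)) := by
  induction ps generalizing seen with
  | nil => simp
  | cons p rest ih =>
    rw [List.foldl_cons, ih _ (by rw [pvMark_length hnn]; exact hi),
        pvMark_getD hnn _ _ _ hi]
    simp only [List.mem_cons]
    constructor
    · rintro ((h | ⟨h1, h2⟩) | ⟨q, hq, hh⟩)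
      · exact Or.inl h
      · exact Or.inr ⟨p, Or.inl rfl, h1, h2⟩
      · exact Or.inr ⟨q, Or.inr hq, hh⟩
    · rintro (h | ⟨q, (rfl | hq), hh⟩)
      · exact Or.inl (Or.inl h)
      · exact Or.inl (Or.inr hh)
      · exact Or.inr ⟨q, hq, hh⟩

lemma pvAllId (l : List Bool) : l.all (fun b => b) = true ↔ ∀ i, i < l.length → l.getD i false = true := by
  rw [List.all_eq_true]
  constructor
  · intro h i hi
    rw [List.getD_eq_getElem?_getD, List.getElem?_eq_getElem hi]
    simpa using h _ (List.getElem_mem hi)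
  · intro h b hb
    rcases List.mem_iff_getElem.1 hb with ⟨i, hi, rfl⟩
    have := h i hi
    rw [List.getD_eq_getElem?_getD, List.getElem?_eq_getElem hi] at this
    simpa using this

lemma pvNodup_of_getElem_inj {l : List Int}
    (h : ∀ i j (hi : i < l.length) (hj : j < l.length), l[i] = l[j] → i = j) : l.Nodup := by
  apply List.nodup_iff_injective_get.2
  rintro ⟨a, ha⟩ ⟨b, hb⟩ hab
  simp only [List.get_eq_getElem] at hab
  exact Fin.ext (h a b ha hb hab)

lemma pvGetD_eq_getElem {l : List Int} {i : Nat} (hi : i < l.length) : l.getD i 0 = l[i] := by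
  rw [List.getD_eq_getElem?_getD, List.getElem?_eq_getElem hi]
  rfl

lemma pvIdx_getD {org : List Int} {x : Int} (hx : x ∈ org) {i : Nat}
    (h : org.idxOf x = i) : org.getD i 0 = x := by
  have hlt := List.idxOf_lt_length_of_mem hx
  have h1 : org[org.idxOf x]? = some x := by
    rw [List.getElem?_eq_getElem hlt, List.getElem_idxOf]
  rw [h] at h1
  rw [List.getD_eq_getElem?_getD, h1]
  rfl

-- B's port equals the characterization
theorem pvB_iff (org : List Int) (seqs : List (List Int)) :
    seqReconstruction_alt org seqs = true ↔ pvC org seqs := by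
  by_cases hg : (pvS seqs).length = org.length
  · have hred : seqReconstruction_alt org seqs =
        (match pvGoSeqs (pvPos org) (List.replicate (org.length - 1) false) seqs with
          | none => false
          | some s => s.all (fun b => b)) := by
      unfold seqReconstruction_alt
      rw [if_neg (by exact fun hc => hc hg)]
      rfl
    have hnn := pvPos_getD_nonneg org
    rcases hgs : pvGoSeqs (pvPos org) (List.replicate (org.length - 1) false) seqs with _ | sfin
    · rw [hred, hgs]
      simp only [Bool.false_eq_true, false_iff]
      rintro ⟨hlen, hnd, hmem, hidx, hwit⟩
      have hsome : pvGoSeqs (pvPos org) (List.replicate (org.length - 1) false) seqs =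
          some ((pvP seqs).foldl (pvMark (pvPos org)) (List.replicate (org.length - 1) false)) := by
        rw [pvGoSeqs_eq_some_iff]
        refine ⟨?_, ?_, rfl⟩
        · intro sq hsq x hx
          exact (pvPos_contains org x).2 (hmem x (List.mem_flatMap.2 ⟨sq, hsq, hx⟩))
        · intro p hp
          have hx := pvP_mem_xs hp
          rw [pvPos_getD_nodup hnd (hmem _ hx.1), pvPos_getD_nodup hnd (hmem _ hx.2)]
          exact_mod_cast hidx p hp
      rw [hgs] at hsome
      simp at hsome
    · rw [hred, hgs]
      rcases (pvGoSeqs_eq_some_iff _ _ _ _).1 hgs with ⟨hmemOK, hincOK, hsfin⟩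
      have hlen : sfin.length = org.length - 1 := by
        rw [hsfin, pvFoldMark_length hnn, List.length_replicate]
      have hseen0 : ∀ i : Nat, (List.replicate (org.length - 1) false).getD i false = false := by
        intro i
        rw [List.getD_eq_getElem?_getD, List.getElem?_replicate]
        split_ifs <;> rfl
      have hmarkiff : ∀ i : Nat, i < org.length - 1 →
          (sfin.getD i false = true ↔
            ∃ p ∈ pvP seqs, (pvPos org).getD p.2 0 = (pvPos org).getD p.1 0 + 1 ∧
              (pvPos org).getD p.1 0 = (i : Int)) := by
        intro i hi
        rw [hsfin, pvFoldMark_getD hnn _ _ _ (by rw [List.length_replicate]; exact hi), hseen0]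
        simp
      rw [pvAllId, hlen]
      constructor
      · -- marks ⇒ pvC
        intro hall
        have hmarks : ∀ i : Nat, i < org.length - 1 →
            ∃ p ∈ pvP seqs, (pvPos org).getD p.2 0 = (pvPos org).getD p.1 0 + 1 ∧
              (pvPos org).getD p.1 0 = (i : Int) := by
          intro i hi
          exact (hmarkiff i hi).1 (hall i hi)
        -- every index < org.length is a pos value
        have hcov : ∀ i : Nat, i < org.length → ∃ x, (pvPos org).get? x = some (i : Int) := by
          intro i hi
          by_cases hlast : i = org.length - 1
          · refine ⟨org[i]'hi, ?_⟩
            refine (pvPos_get?_iff _ _ _).2 ⟨i, rfl, ?_, ?_⟩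
            · rw [List.getElem?_eq_getElem hi]
            · intro j hj
              rw [List.getElem?_eq_none (by omega)]
              simp
          · rcases hmarks i (by omega) with ⟨p, hp, _, hpi⟩
            have hx1 : p.1 ∈ pvXs seqs := (pvP_mem_xs hp).1
            rcases List.mem_flatMap.1 hx1 with ⟨sq, hsq, hxin⟩
            have hc := hmemOK sq hsq p.1 hxin
            rw [PySem.Dict.contains_eq_isSome_get?] at hc
            rcases Option.isSome_iff_exists.1 hc with ⟨v, hv⟩
            refine ⟨p.1, ?_⟩
            rw [hv]
            have := PySem.Dict.getD_of_get?_eq_some _ 0 hv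
            rw [this] at hpi
            rw [hpi]
        have hget : ∀ (i : Nat) (hi : i < org.length), (pvPos org).get? (org[i]'hi) = some (i : Int) := by
          intro i hi
          rcases hcov i hi with ⟨x, hx⟩
          rcases pvPos_value_index hx with ⟨k, hk, hgk⟩
          have hki : k = i := by exact_mod_cast hk
          subst hki
          rw [List.getElem?_eq_getElem hi] at hgk
          have hxx : org[k] = x := by injection hgk
          rw [hxx]
          exact hx
        have hnd : org.Nodup := by
          apply pvNodup_of_getElem_inj
          intro i j hi hj hij
          have h1 := hget i hi
          have h2 := hget j hj
          rw [hij, h2] at h1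
          injection h1 with h1
          exact_mod_cast h1.symm
        have hmem : ∀ x ∈ pvXs seqs, x ∈ org := by
          intro x hx
          rcases List.mem_flatMap.1 hx with ⟨sq, hsq, hxin⟩
          exact (pvPos_contains org x).1 (hmemOK sq hsq x hxin)
        refine ⟨hg, hnd, hmem, ?_, ?_⟩
        · intro p hp
          have hx := pvP_mem_xs hp
          have h1 := hincOK p hp
          rw [pvPos_getD_nodup hnd (hmem _ hx.1), pvPos_getD_nodup hnd (hmem _ hx.2)] at h1
          exact_mod_cast h1
        · intro i hi
          rcases hmarks i (by omega) with ⟨p, hp, hadj, hpi⟩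
          have hx := pvP_mem_xs hp
          have e1 : (pvPos org).getD p.1 0 = ((org.idxOf p.1 : Nat) : Int) := pvPos_getD_nodup hnd (hmem _ hx.1)
          have e2 : (pvPos org).getD p.2 0 = ((org.idxOf p.2 : Nat) : Int) := pvPos_getD_nodup hnd (hmem _ hx.2)
          have hi1 : org.idxOf p.1 = i := by
            rw [e1] at hpi
            exact_mod_cast hpi
          have hi2 : org.idxOf p.2 = i + 1 := by
            rw [e1, e2] at hadj
            have h2 : ((org.idxOf p.2 : Nat) : Int) = (i : Int) + 1 := by
              rw [e1] at hpi
              omega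
            exact_mod_cast h2
          rw [pvIdx_getD (hmem _ hx.1) hi1, pvIdx_getD (hmem _ hx.2) hi2]
          have hpe : (p.1, p.2) = p := rfl
          rw [hpe]
          exact hp
      · -- pvC ⇒ marks
        rintro ⟨hlen2, hnd, hmem, hidx, hwit⟩ i hi
        rw [hmarkiff i hi]
        refine ⟨(org.getD i 0, org.getD (i+1) 0), hwit i (by omega), ?_, ?_⟩
        · have g1 : org.getD i 0 = org[i]'(by omega) := pvGetD_eq_getElem (by omega)
          have g2 : org.getD (i+1) 0 = org[i+1]'(by omega) := pvGetD_eq_getElem (by omega)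
          rw [g1, g2,
            pvPos_getD_nodup hnd (List.getElem_mem (by omega)),
            pvPos_getD_nodup hnd (List.getElem_mem (by omega)),
            List.Nodup.idxOf_getElem hnd i (by omega),
            List.Nodup.idxOf_getElem hnd (i+1) (by omega)]
          push_cast
          ring
        · have g1 : org.getD i 0 = org[i]'(by omega) := pvGetD_eq_getElem (by omega)
          rw [g1, pvPos_getD_nodup hnd (List.getElem_mem (by omega)),
            List.Nodup.idxOf_getElem hnd i (by omega)]
  · have hred : seqReconstruction_alt org seqs = false := by
      unfold seqReconstruction_alt
      rw [if_pos (by exact hg)]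
    rw [hred]
    simp only [Bool.false_eq_true, false_iff]
    rintro ⟨hlen, -⟩
    exact hg hlen

-- ---- A side: edges, degrees, counts ----
def pvEdge (seqs : List (List Int)) (x y : Int) : Bool := decide ((x, y) ∈ pvP seqs)

def pvDeg (seqs : List (List Int)) (y : Int) : Nat :=
  ((pvS seqs).filter (fun x => pvEdge seqs x y)).length

def pvCnt (seqs : List (List Int)) (r : List Int) (y : Int) : Nat :=
  ((pvS seqs).filter (fun x => pvEdge seqs x y && decide (x ∈ r))).length

lemma pvS_nodup (seqs : List (List Int)) : (pvS seqs).Nodup := PySem.Set.nodup_ofList _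

lemma pvEdge_mem_S {seqs : List (List Int)} {x y : Int} (h : pvEdge seqs x y = true) :
    x ∈ pvS seqs ∧ y ∈ pvS seqs := by
  have hp : (x, y) ∈ pvP seqs := of_decide_eq_true h
  have := pvP_mem_xs hp
  exact ⟨(PySem.Set.mem_ofList _ _).2 this.1, (PySem.Set.mem_ofList _ _).2 this.2⟩

-- generic filter-length lemmas
lemma pvFiltMono {α : Type} (l : List α) (p q : α → Bool) (h : ∀ a, q a = true → p a = true) :
    (l.filter q).length ≤ (l.filter p).length := by
  induction l with
  | nil => simp
  | cons a t ih =>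
    simp only [List.filter_cons]
    rcases hq : q a with _ | _
    · rw [if_neg (by simp [hq])]
      rcases hp : p a with _ | _
      · rw [if_neg (by simp [hp])]
        exact ih
      · rw [if_pos (by simp [hp])]
        simp only [List.length_cons]
        omega
    · rw [if_pos (by simp [hq]), if_pos (by simp [h a hq])]
      simp only [List.length_cons]
      omega

lemma pvFiltStrict {α : Type} (l : List α) (p q : α → Bool) (h : ∀ a, q a = true → p a = true)
    (a : α) (ha : a ∈ l) (hpa : p a = true) (hqa : q a = false) :
    (l.filter q).length < (l.filter p).length := by
  induction l with
  | nil => simp at ha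
  | cons b t ih =>
    simp only [List.filter_cons]
    rcases List.mem_cons.1 ha with rfl | hb
    · rw [if_neg (by simp [hqa]), if_pos (by simp [hpa])]
      simp only [List.length_cons]
      have := pvFiltMono t p q h
      omega
    · rcases hq : q b with _ | _
      · rw [if_neg (by simp [hq])]
        rcases hp : p b with _ | _
        · rw [if_neg (by simp [hp])]
          exact ih hb
        · rw [if_pos (by simp [hp])]
          simp only [List.length_cons]
          have := ih hb
          omega
      · rw [if_pos (by simp [hq]), if_pos (by simp [h b hq])]
        simp only [List.length_cons]
        have := ih hb
        omega

lemma pvFiltAllOfLenEq {α : Type} (l : List α) (p q : α → Bool) (h : ∀ a, q a = true → p a = true)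
    (hlen : (l.filter p).length = (l.filter q).length) :
    ∀ a ∈ l, p a = true → q a = true := by
  intro a ha hpa
  by_contra hq
  have hq' : q a = false := by
    rcases hqa : q a with _ | _
    · rfl
    · exact absurd hqa hq
  have := pvFiltStrict l p q h a ha hpa hq'
  omega

lemma pvFiltFlip {α : Type} [DecidableEq α] (l : List α) (hnd : l.Nodup) (p p' : α → Bool)
    (a : α) (ha : a ∈ l) (h : ∀ x, x ≠ a → p' x = p x) (hpa : p a = false) (hpa' : p' a = true) :
    (l.filter p').length = (l.filter p).length + 1 := by
  induction l with
  | nil => simp at ha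
  | cons b t ih =>
    rcases List.nodup_cons.1 hnd with ⟨hbt, hndt⟩
    simp only [List.filter_cons]
    rcases List.mem_cons.1 ha with rfl | hb
    · rw [if_pos (by simp [hpa']), if_neg (by simp [hpa])]
      have heq : t.filter p' = t.filter p := by
        apply List.filter_congr
        intro x hx
        exact h x (fun hxa => hbt (hxa ▸ hx))
      rw [heq]
      simp
    · have hba : b ≠ a := fun hba => hbt (hba ▸ hb)
      rcases hp : p b with _ | _
      · rw [if_neg (by simp [h b hba, hp]), if_neg (by simp [hp])]
        exact ih hndt hb
      · rw [if_pos (by simp [h b hba, hp]), if_pos (by simp [hp])]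
        simp only [List.length_cons]
        rw [ih hndt hb]

lemma pvFiltSingleton {α : Type} (l : List α) (hnd : l.Nodup) (c : α) (hc : c ∈ l)
    (p : α → Bool) (h : ∀ y ∈ l, p y = true ↔ y = c) : l.filter p = [c] := by
  induction l with
  | nil => simp at hc
  | cons b t ih =>
    rcases List.nodup_cons.1 hnd with ⟨hbt, hndt⟩
    simp only [List.filter_cons]
    rcases List.mem_cons.1 hc with rfl | hcm
    · rw [if_pos ((h c List.mem_cons_self).2 rfl)]
      have : t.filter p = [] := by
        rw [List.filter_eq_nil_iff]
        intro y hy hpy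
        exact hbt (((h y (List.mem_cons_of_mem _ hy)).1 hpy) ▸ hy)
      rw [this]
    · have hbc : b ≠ c := fun hbc => hbt (hbc ▸ hcm)
      have hpb : p b = false := by
        rcases hpb : p b with _ | _
        · rfl
        · exact absurd ((h b List.mem_cons_self).1 hpb) hbc
      rw [if_neg (by simp [hpb])]
      exact ih hndt hcm (fun y hy => h y (List.mem_cons_of_mem _ hy))

lemma pvFiltTwo {α : Type} (l : List α) (p : α → Bool) (a b : α) (hab : a ≠ b)
    (ha : a ∈ l.filter p) (hb : b ∈ l.filter p) : 2 ≤ (l.filter p).length := by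
  have hs : [a, b].Subperm (l.filter p) := by
    apply List.subperm_of_subset
    · simp [hab]
    · intro x hx
      rcases List.mem_cons.1 hx with rfl | hx
      · exact ha
      · simp at hx
        exact hx ▸ hb
  simpa using hs.length_le

-- pvCnt facts
lemma pvCnt_nil (seqs : List (List Int)) (y : Int) : pvCnt seqs [] y = 0 := by
  simp [pvCnt]

lemma pvCnt_le_deg (seqs : List (List Int)) (r : List Int) (y : Int) :
    pvCnt seqs r y ≤ pvDeg seqs y := by
  apply pvFiltMono
  intro a ha
  exact (Bool.and_eq_true_iff.1 ha).1

lemma pvCnt_append (seqs : List (List Int)) {r : List Int} {v : Int}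
    (hv : v ∈ pvS seqs) (hnv : v ∉ r) (y : Int) :
    pvCnt seqs (r ++ [v]) y = pvCnt seqs r y + (if pvEdge seqs v y = true then 1 else 0) := by
  rcases he : pvEdge seqs v y with _ | _
  · rw [if_neg (by simp [he])]
    unfold pvCnt
    apply congrArg List.length
    apply List.filter_congr
    intro x hx
    by_cases hxv : x = v
    · subst hxv
      rw [he]
      simp
    · simp only [List.mem_append, List.mem_singleton]
      simp [hxv]
  · rw [if_pos rfl]
    apply pvFiltFlip (pvS seqs) (pvS_nodup seqs) _ _ v hv
    · intro x hxv
      simp only [List.mem_append, List.mem_singleton]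
      simp [hxv]
    · simp [hnv]
    · simp [he]

lemma pvAllPredsIn {seqs : List (List Int)} {r : List Int} {y : Int}
    (h : pvDeg seqs y = pvCnt seqs r y) :
    ∀ x, pvEdge seqs x y = true → x ∈ r := by
  intro x hx
  have hxS : x ∈ pvS seqs := (pvEdge_mem_S hx).1
  have := pvFiltAllOfLenEq (pvS seqs) (fun x => pvEdge seqs x y)
      (fun x => pvEdge seqs x y && decide (x ∈ r))
      (fun a ha => (Bool.and_eq_true_iff.1 ha).1) h x hxS hx
  have := (Bool.and_eq_true_iff.1 this).2
  exact of_decide_eq_true this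

lemma pvCnt_lt_deg {seqs : List (List Int)} {r : List Int} {v y : Int}
    (he : pvEdge seqs v y = true) (hvr : v ∉ r) :
    pvCnt seqs r y < pvDeg seqs y := by
  unfold pvCnt pvDeg
  exact pvFiltStrict (pvS seqs) (fun x => pvEdge seqs x y)
    (fun x => pvEdge seqs x y && decide (x ∈ r))
    (fun a ha => (Bool.and_eq_true_iff.1 ha).1) v (pvEdge_mem_S he).1 he (by simp [hvr])

-- ---- build phase: graph and indeg characterization ----
def pvIndeg0 (seqs : List (List Int)) : PySem.Dict Int Int :=
  (pvS seqs).foldl (fun d x => d.insert x 0) PySem.Dict.empty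

def pvSt (seqs : List (List Int)) : PySem.Dict Int (List Int) × PySem.Dict Int Int :=
  (pvP seqs).foldl pvBuildStep (PySem.Dict.empty, pvIndeg0 seqs)

lemma pvIndeg0_getD (seqs : List (List Int)) (y : Int) : (pvIndeg0 seqs).getD y 0 = 0 := by
  have aux : ∀ (l : List Int) (d : PySem.Dict Int Int), (∀ z, d.getD z 0 = 0) →
      ∀ z, (l.foldl (fun d x => d.insert x 0) d).getD z 0 = 0 := by
    intro l
    induction l with
    | nil => intro d h z; exact h z
    | cons a t ih =>
      intro d h z
      rw [List.foldl_cons]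
      apply ih
      intro w
      rw [PySem.Dict.getD_insert]
      split_ifs
      · rfl
      · exact h w
  exact aux _ _ (fun z => PySem.Dict.getD_empty z 0) y

lemma pvFoldlAdd_nodup (l acc : List Int) (hd : ∀ a ∈ l, a ∉ acc) (hnd : l.Nodup) :
    l.foldl PySem.Set.add acc = acc ++ l := by
  induction l generalizing acc with
  | nil => simp
  | cons a t ih =>
    rcases List.nodup_cons.1 hnd with ⟨hat, hndt⟩
    rw [List.foldl_cons]
    have hadd : PySem.Set.add acc a = acc ++ [a] := by
      unfold PySem.Set.add
      rw [if_neg]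
      simp only [PySem.Set.contains]
      intro hc
      exact hd a List.mem_cons_self (List.contains_iff_mem.1 hc)
    rw [hadd, ih _ ?_ hndt]
    · simp
    · intro b hb
      simp only [List.mem_append, List.mem_singleton]
      rintro (hba | rfl)
      · exact hd b (List.mem_cons_of_mem _ hb) hba
      · exact hat hb

lemma pvOfList_self {l : List Int} (h : l.Nodup) : PySem.Set.ofList l = l := by
  rw [PySem.Set.ofList_eq_foldl, pvFoldlAdd_nodup l [] (by simp) h]
  simp

lemma pvIndeg0_keys (seqs : List (List Int)) : (pvIndeg0 seqs).keys = pvS seqs := by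
  unfold pvIndeg0
  rw [PySem.Dict.keys_foldl_insert (f := fun _ _ => 0)]
  show PySem.Set.update (PySem.Dict.empty : PySem.Dict Int Int).keys (pvS seqs) = pvS seqs
  unfold PySem.Set.update
  have h0 : (PySem.Dict.empty : PySem.Dict Int Int).keys = ([] : List Int) := rfl
  rw [h0, ← PySem.Set.ofList_eq_foldl]
  exact pvOfList_self (pvS_nodup seqs)

def pvBInv (seqs : List (List Int)) (Q : List (Int × Int))
    (st : PySem.Dict Int (List Int) × PySem.Dict Int Int) : Prop :=
  (∀ x, (st.1.getD x []).Nodup) ∧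
  (∀ x y, y ∈ st.1.getD x [] ↔ (x, y) ∈ Q) ∧
  (∀ y, st.2.getD y 0 = (((pvS seqs).filter (fun x => decide ((x, y) ∈ Q))).length : Int)) ∧
  st.2.keys = pvS seqs

lemma pvBuildStep_inv {seqs : List (List Int)} {Q : List (Int × Int)}
    {st : PySem.Dict Int (List Int) × PySem.Dict Int Int} {q : Int × Int}
    (hq1 : q.1 ∈ pvS seqs) (hq2 : q.2 ∈ pvS seqs) (h : pvBInv seqs Q st) :
    pvBInv seqs (Q ++ [q]) (pvBuildStep st q) := by
  obtain ⟨h1, h2, h3, h4⟩ := h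
  obtain ⟨a, b⟩ := q
  simp only at hq1 hq2
  unfold pvBuildStep
  by_cases hc : (st.1.getD a []).contains b = true
  · rw [if_pos hc]
    have hab : (a, b) ∈ Q := (h2 a b).1 (List.contains_iff_mem.1 hc)
    refine ⟨h1, ?_, ?_, h4⟩
    · intro x y
      rw [h2 x y]
      simp only [List.mem_append, List.mem_singleton]
      constructor
      · exact Or.inl
      · rintro (hy | hy)
        · exact hy
        · rw [hy]; exact hab
    · intro y
      rw [h3 y]
      congr 2
      apply List.filter_congr
      intro x hx
      simp only [List.mem_append, List.mem_singleton, decide_eq_decide]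
      constructor
      · exact Or.inl
      · rintro (hy | hy)
        · exact hy
        · rw [hy]; exact hab
  · rw [if_neg hc]
    have hab : (a, b) ∉ Q := fun hmem => hc (List.contains_iff_mem.2 ((h2 a b).2 hmem))
    refine ⟨?_, ?_, ?_, ?_⟩
    · intro x
      simp only []
      rw [PySem.Dict.getD_insert]
      split_ifs with hx
      · subst hx
        apply List.Nodup.append (h1 x) (List.nodup_singleton b)
        intro z hz hzb
        simp only [List.mem_singleton] at hzb
        subst hzb
        exact hc (List.contains_iff_mem.2 hz)
      · exact h1 x
    · intro x y
      simp only []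
      rw [PySem.Dict.getD_insert]
      split_ifs with hx
      · subst hx
        simp only [List.mem_append, List.mem_singleton]
        rw [h2 x y]
        constructor
        · rintro (hy | rfl)
          · exact Or.inl hy
          · exact Or.inr rfl
        · rintro (hy | hy)
          · exact Or.inl hy
          · injection hy with _ hy2
            exact Or.inr hy2
      · rw [h2 x y]
        simp only [List.mem_append, List.mem_singleton]
        constructor
        · exact Or.inl
        · rintro (hy | hy)
          · exact hy
          · exfalso
            injection hy with hy1 _
            exact hx hy1
    · intro y
      simp only []
      rw [PySem.Dict.getD_insert]
      split_ifs with hy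
      · subst hy
        rw [h3 y]
        have hflip : ((pvS seqs).filter (fun x => decide ((x, y) ∈ Q ++ [(a, y)]))).length
            = ((pvS seqs).filter (fun x => decide ((x, y) ∈ Q))).length + 1 := by
          apply pvFiltFlip (pvS seqs) (pvS_nodup seqs) _ _ a hq1
          · intro x hxa
            simp only [List.mem_append, List.mem_singleton, decide_eq_decide]
            constructor
            · rintro (hy | hy)
              · exact hy
              · exfalso
                injection hy with hy1 _
                exact hxa hy1
            · exact Or.inl
          · simpa using hab
          · simp
        rw [hflip]
        push_cast
        ring
      · rw [h3 y]
        congr 2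
        apply List.filter_congr
        intro x hx
        simp only [List.mem_append, List.mem_singleton, decide_eq_decide]
        constructor
        · exact Or.inl
        · rintro (hz | hz)
          · exact hz
          · exfalso
            injection hz with _ hz2
            exact hy hz2
    · simp only []
      rw [PySem.Dict.keys_insert_of_contains]
      · exact h4
      · rw [PySem.Dict.contains_iff_mem_keys, h4]
        exact hq2

lemma pvBuild_inv {seqs : List (List Int)} (R : List (Int × Int))
    (hR : ∀ p ∈ R, p.1 ∈ pvS seqs ∧ p.2 ∈ pvS seqs) :
    ∀ (Q : List (Int × Int)) (st : PySem.Dict Int (List Int) × PySem.Dict Int Int),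
      pvBInv seqs Q st → pvBInv seqs (Q ++ R) (R.foldl pvBuildStep st) := by
  induction R with
  | nil =>
    intro Q st h
    simpa using h
  | cons q R' ih =>
    intro Q st h
    rw [List.foldl_cons]
    have hstep := pvBuildStep_inv (hR q List.mem_cons_self).1 (hR q List.mem_cons_self).2 h
    have := ih (fun p hp => hR p (List.mem_cons_of_mem _ hp)) (Q ++ [q]) _ hstep
    rwa [List.append_assoc, List.singleton_append] at this

lemma pvSt_inv (seqs : List (List Int)) : pvBInv seqs (pvP seqs) (pvSt seqs) := by
  have hinit : pvBInv seqs [] (PySem.Dict.empty, pvIndeg0 seqs) := by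
    refine ⟨?_, ?_, ?_, pvIndeg0_keys seqs⟩
    · intro x
      show (PySem.Dict.empty.getD x ([] : List Int)).Nodup
      rw [PySem.Dict.getD_empty]
      exact List.nodup_nil
    · intro x y
      show y ∈ PySem.Dict.empty.getD x ([] : List Int) ↔ _
      rw [PySem.Dict.getD_empty]
      simp
    · intro y
      show (pvIndeg0 seqs).getD y 0 = _
      rw [pvIndeg0_getD]
      simp
  have := pvBuild_inv (pvP seqs)
    (fun p hp => ⟨(PySem.Set.mem_ofList _ _).2 (pvP_mem_xs hp).1,
                  (PySem.Set.mem_ofList _ _).2 (pvP_mem_xs hp).2⟩)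
    [] (PySem.Dict.empty, pvIndeg0 seqs) hinit
  simpa using this

lemma pvG_nodup (seqs : List (List Int)) (x : Int) : ((pvSt seqs).1.getD x []).Nodup :=
  (pvSt_inv seqs).1 x

lemma pvG_mem (seqs : List (List Int)) (x y : Int) :
    y ∈ (pvSt seqs).1.getD x [] ↔ pvEdge seqs x y = true := by
  rw [(pvSt_inv seqs).2.1 x y]
  unfold pvEdge
  simp

lemma pvInd_getD (seqs : List (List Int)) (y : Int) :
    (pvSt seqs).2.getD y 0 = (pvDeg seqs y : Int) := by
  rw [(pvSt_inv seqs).2.2.1 y]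
  rfl

lemma pvInd_keys (seqs : List (List Int)) : (pvSt seqs).2.keys = pvS seqs :=
  (pvSt_inv seqs).2.2.2

-- ---- small list lemmas ----
lemma pvIdxOf_concat_self {l : List Int} {v : Int} (h : v ∉ l) :
    (l ++ [v]).idxOf v = l.length := by
  induction l with
  | nil => simp
  | cons a t ih =>
    have hav : (a == v) = false := by
      simp only [beq_eq_false_iff_ne, ne_eq]
      rintro rfl; exact h List.mem_cons_self
    simp only [List.cons_append, List.idxOf_cons, hav, cond_false, List.length_cons]
    rw [ih (fun hm => h (List.mem_cons_of_mem _ hm))]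

lemma pvNodup_concat {l : List Int} {v : Int} (h : v ∉ l) (hn : l.Nodup) :
    (l ++ [v]).Nodup := by
  rw [List.nodup_append]
  refine ⟨hn, List.nodup_singleton v, ?_⟩
  intro a ha b hb hab
  rw [List.mem_singleton] at hb
  subst hb
  subst hab
  exact h ha

lemma pvGetD_append_left {l : List Int} {i : Nat} (hi : i < l.length) (t : List Int) :
    (l ++ t).getD i 0 = l.getD i 0 := by
  rw [List.getD_eq_getElem?_getD, List.getD_eq_getElem?_getD, List.getElem?_append_left hi]

lemma pvGetD_concat_self (l : List Int) (v : Int) : (l ++ [v]).getD l.length 0 = v := by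
  rw [List.getD_eq_getElem?_getD, List.getElem?_append_right (le_refl _)]
  simp

lemma pvGetLast?_getD (l : List Int) : l.getLast?.getD 0 = l.getD (l.length - 1) 0 := by
  rw [List.getLast?_eq_getElem?, List.getD_eq_getElem?_getD]

lemma pvBeqSubOne (a : Int) : ((a - 1) == 0) = (a == 1) := by
  by_cases h : a = 1
  · subst h
    simp
  · have h1 : a - 1 ≠ 0 := by omega
    simp [h, h1]

-- ---- the decrement loop of one Kahn iteration ----
lemma pvDecFold (N : List Int) (hN : N.Nodup) (ind : PySem.Dict Int Int) (qa : List Int) :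
    (∀ z, (N.foldl (fun st x =>
        let ind2 := st.1.insert x (st.1.getD x 0 - 1)
        if ind2.getD x 0 == 0 then (ind2, st.2 ++ [x]) else (ind2, st.2))
        (ind, qa)).1.getD z 0 = ind.getD z 0 - (if z ∈ N then 1 else 0)) ∧
    (N.foldl (fun st x =>
        let ind2 := st.1.insert x (st.1.getD x 0 - 1)
        if ind2.getD x 0 == 0 then (ind2, st.2 ++ [x]) else (ind2, st.2))
        (ind, qa)).2 = qa ++ N.filter (fun y => ind.getD y 0 == 1) := by
  induction N generalizing ind qa with
  | nil => simp
  | cons y t ih =>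
    rcases List.nodup_cons.1 hN with ⟨hyt, hndt⟩
    have hgd : (ind.insert y (ind.getD y 0 - 1)).getD y 0 = ind.getD y 0 - 1 :=
      PySem.Dict.getD_insert_self _ _ _ _
    have hstep : (let ind2 := ind.insert y (ind.getD y 0 - 1)
          if (ind2.getD y 0 == 0) = true then (ind2, qa ++ [y]) else (ind2, qa))
        = (ind.insert y (ind.getD y 0 - 1),
           if (ind.getD y 0 == 1) = true then qa ++ [y] else qa) := by
      show (if ((ind.insert y (ind.getD y 0 - 1)).getD y 0 == 0) = true
            then (ind.insert y (ind.getD y 0 - 1), qa ++ [y])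
            else (ind.insert y (ind.getD y 0 - 1), qa)) = _
      rw [hgd, pvBeqSubOne]
      split_ifs <;> rfl
    rw [List.foldl_cons, hstep]
    have hind' : ∀ z, (ind.insert y (ind.getD y 0 - 1)).getD z 0
        = ind.getD z 0 - (if z = y then 1 else 0) := by
      intro z
      rw [PySem.Dict.getD_insert]
      split_ifs with hz
      · subst hz; ring
      · ring
    rcases ih hndt (ind.insert y (ind.getD y 0 - 1))
        (if ind.getD y 0 == 1 then qa ++ [y] else qa) with ⟨ih1, ih2⟩
    constructor
    · intro z
      rw [ih1 z, hind' z]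
      by_cases hz : z = y
      · subst hz
        rw [if_pos List.mem_cons_self, if_pos rfl, if_neg (fun hm => hyt hm)]
        ring
      · rw [if_neg hz]
        by_cases hzt : z ∈ t
        · rw [if_pos hzt, if_pos (List.mem_cons_of_mem _ hzt)]
          ring
        · rw [if_neg hzt, if_neg (by simp [hz, hzt])]
          ring
    · rw [ih2]
      have hfc : t.filter (fun w => (ind.insert y (ind.getD y 0 - 1)).getD w 0 == 1)
          = t.filter (fun w => ind.getD w 0 == 1) := by
        apply List.filter_congr
        intro w hw
        rw [PySem.Dict.getD_insert, if_neg (by rintro rfl; exact hyt hw)]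
      rw [hfc, List.filter_cons]
      rcases hy : ind.getD y 0 == 1 with _ | _
      · rw [if_neg (by simp [hy]), if_neg (by simp)]
      · rw [if_pos rfl, if_pos (by simp)]
        simp

-- ---- Kahn loop invariant & soundness ----
def pvKInv (seqs : List (List Int)) (ind : PySem.Dict Int Int) (q res : List Int) : Prop :=
  res.Nodup ∧
  (∀ v ∈ res, v ∈ pvS seqs) ∧
  (∀ y ∈ q, y ∈ pvS seqs ∧ y ∉ res) ∧
  (∀ y, ind.getD y 0 = (pvDeg seqs y : Int) - (pvCnt seqs res y : Int)) ∧
  (∀ y ∈ q, pvDeg seqs y = pvCnt seqs res y) ∧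
  (∀ x y, pvEdge seqs x y = true → y ∈ res → x ∈ res ∧ res.idxOf x < res.idxOf y) ∧
  (∀ i : Nat, i + 1 < res.length → pvEdge seqs (res.getD i 0) (res.getD (i+1) 0) = true) ∧
  (res = [] ∨ ∀ y ∈ q, pvEdge seqs (res.getLast?.getD 0) y = true) ∧
  (∀ y ∈ res, pvDeg seqs y = pvCnt seqs res y)

lemma pvKInv_step {seqs : List (List Int)} {ind : PySem.Dict Int Int} {v : Int} {res : List Int}
    (h : pvKInv seqs ind [v] res) :
    pvKInv seqs
      (((pvSt seqs).1.getD v []).foldl (fun st x =>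
        let ind2 := st.1.insert x (st.1.getD x 0 - 1)
        if ind2.getD x 0 == 0 then (ind2, st.2 ++ [x]) else (ind2, st.2)) (ind, ([] : List Int))).1
      (((pvSt seqs).1.getD v []).foldl (fun st x =>
        let ind2 := st.1.insert x (st.1.getD x 0 - 1)
        if ind2.getD x 0 == 0 then (ind2, st.2 ++ [x]) else (ind2, st.2)) (ind, ([] : List Int))).2
      (res ++ [v]) := by
  obtain ⟨ha, hb, hq, hc, hd, he, hf, hg, hh⟩ := h
  have hvS : v ∈ pvS seqs := (hq v List.mem_cons_self).1
  have hvres : v ∉ res := (hq v List.mem_cons_self).2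
  have hdv : pvDeg seqs v = pvCnt seqs res v := hd v List.mem_cons_self
  have hNnd := pvG_nodup seqs v
  have hNmem := pvG_mem seqs v
  rcases pvDecFold ((pvSt seqs).1.getD v []) hNnd ind [] with ⟨hi1, hi2⟩
  simp only [List.nil_append] at hi2
  have hnoself : pvEdge seqs v v = false := by
    rcases hvv : pvEdge seqs v v with _ | _
    · rfl
    · exact absurd hdv (Nat.ne_of_gt (pvCnt_lt_deg hvv hvres))
  have hcnt' : ∀ y, pvCnt seqs (res ++ [v]) y
      = pvCnt seqs res y + (if pvEdge seqs v y = true then 1 else 0) :=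
    fun y => pvCnt_append seqs hvS hvres y
  have hindN : ∀ z, (if z ∈ (pvSt seqs).1.getD v [] then (1 : Int) else 0)
      = (if pvEdge seqs v z = true then 1 else 0) := by
    intro z
    by_cases hz : z ∈ (pvSt seqs).1.getD v []
    · rw [if_pos hz, if_pos ((hNmem z).1 hz)]
    · rw [if_neg hz, if_neg (fun hc2 => hz ((hNmem z).2 hc2))]
  have hc' : ∀ y, (((pvSt seqs).1.getD v []).foldl (fun st x =>
        let ind2 := st.1.insert x (st.1.getD x 0 - 1)
        if ind2.getD x 0 == 0 then (ind2, st.2 ++ [x]) else (ind2, st.2))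
        (ind, ([] : List Int))).1.getD y 0
      = (pvDeg seqs y : Int) - (pvCnt seqs (res ++ [v]) y : Int) := by
    intro y
    rw [hi1 y, hindN y, hc y, hcnt' y]
    by_cases hy : pvEdge seqs v y = true
    · rw [if_pos hy, if_pos hy]
      push_cast
      ring
    · rw [if_neg hy, if_neg hy]
      push_cast
      ring
  have hq'mem : ∀ y ∈ ((pvSt seqs).1.getD v []).filter (fun y => ind.getD y 0 == 1),
      pvEdge seqs v y = true ∧ ind.getD y 0 = 1 := by
    intro y hy
    rcases List.mem_filter.1 hy with ⟨hyN, hy1⟩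
    exact ⟨(hNmem y).1 hyN, by simpa using hy1⟩
  refine ⟨pvNodup_concat hvres ha, ?_, ?_, hc', ?_, ?_, ?_, ?_, ?_⟩
  · intro w hw
    rcases List.mem_append.1 hw with hw | hw
    · exact hb w hw
    · simp only [List.mem_singleton] at hw
      exact hw ▸ hvS
  · -- q' members in S and not in res'
    intro y hy
    rw [hi2] at hy
    rcases hq'mem y hy with ⟨hey, hy1⟩
    refine ⟨(pvEdge_mem_S hey).2, ?_⟩
    intro hyres'
    rcases List.mem_append.1 hyres' with hyres | hyv
    · have := hh y hyres
      have := hc y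
      omega
    · simp only [List.mem_singleton] at hyv
      subst hyv
      have := hc y
      omega
  · -- new q elements have all preds in res'
    intro y hy
    rw [hi2] at hy
    rcases hq'mem y hy with ⟨hey, hy1⟩
    have h1 := hc y
    have h2 := hcnt' y
    rw [if_pos hey] at h2
    have hle := pvCnt_le_deg seqs res y
    omega
  · -- edge closure with positions
    intro x y hxy hyres'
    rcases List.mem_append.1 hyres' with hyres | hyv
    · rcases he x y hxy hyres with ⟨hxres, hidx⟩
      refine ⟨List.mem_append_left _ hxres, ?_⟩
      rw [List.idxOf_append_of_mem hxres, List.idxOf_append_of_mem hyres]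
      exact hidx
    · simp only [List.mem_singleton] at hyv
      subst hyv
      have hxres : x ∈ res := pvAllPredsIn hdv x hxy
      refine ⟨List.mem_append_left _ hxres, ?_⟩
      rw [List.idxOf_append_of_mem hxres, pvIdxOf_concat_self hvres]
      exact List.idxOf_lt_length_of_mem hxres
  · -- consecutive edges
    intro i hi
    rw [List.length_append, List.length_singleton] at hi
    by_cases hilt : i + 1 < res.length
    · rw [pvGetD_append_left (by omega) [v], pvGetD_append_left hilt [v]]
      exact hf i hilt
    · have hieq : i + 1 = res.length := by omega
      have hres_ne : res ≠ [] := by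
        intro hres0
        have h0 : res.length = 0 := by rw [hres0]; rfl
        omega
      rcases hg with hg0 | hg1
      · exact absurd hg0 hres_ne
      · have hlast := hg1 v List.mem_cons_self
        rw [pvGetLast?_getD] at hlast
        have h1 : (res ++ [v]).getD i 0 = res.getD i 0 := pvGetD_append_left (by omega) [v]
        have h2 : (res ++ [v]).getD (i+1) 0 = v := by
          rw [hieq]
          exact pvGetD_concat_self res v
        rw [h1, h2]
        have : res.length - 1 = i := by omega
        rwa [this] at hlast
  · -- last-element edges into the new queue
    right
    intro y hy
    rw [hi2] at hy
    have : (res ++ [v]).getLast? = some v := List.getLast?_concat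
    rw [this]
    exact (hq'mem y hy).1
  · -- processed elements keep all preds inside
    intro y hyres'
    rcases List.mem_append.1 hyres' with hyres | hyv
    · have hold := hh y hyres
      rw [hcnt' y]
      have : pvEdge seqs v y = false := by
        rcases hvy : pvEdge seqs v y with _ | _
        · rfl
        · rcases he v y hvy hyres with ⟨hvres', _⟩
          exact absurd hvres' hvres
      rw [if_neg (by simp [this])]
      omega
    · simp only [List.mem_singleton] at hyv
      subst hyv
      rw [hcnt' y, if_neg (by simp [hnoself])]
      omega

lemma pvKahn_sound (seqs : List (List Int)) (fuel : Nat) :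
    ∀ (ind : PySem.Dict Int Int) (q res : List Int), pvKInv seqs ind q res →
      ((pvKahn fuel (pvSt seqs).1 ind q res).Nodup ∧
       (∀ w ∈ pvKahn fuel (pvSt seqs).1 ind q res, w ∈ pvS seqs) ∧
       (∀ x y, pvEdge seqs x y = true → y ∈ pvKahn fuel (pvSt seqs).1 ind q res →
          x ∈ pvKahn fuel (pvSt seqs).1 ind q res ∧
          (pvKahn fuel (pvSt seqs).1 ind q res).idxOf x
            < (pvKahn fuel (pvSt seqs).1 ind q res).idxOf y) ∧
       (∀ i : Nat, i + 1 < (pvKahn fuel (pvSt seqs).1 ind q res).length →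
          pvEdge seqs ((pvKahn fuel (pvSt seqs).1 ind q res).getD i 0)
            ((pvKahn fuel (pvSt seqs).1 ind q res).getD (i+1) 0) = true)) := by
  induction fuel with
  | zero =>
    intro ind q res h
    obtain ⟨ha, hb, hq, hc, hd, he, hf, hg, hh⟩ := h
    exact ⟨ha, hb, he, hf⟩
  | succ fuel ih =>
    intro ind q res h
    by_cases hq1 : q.length = 1
    · rcases List.length_eq_one_iff.1 hq1 with ⟨v, rfl⟩
      have hunf : pvKahn (fuel + 1) (pvSt seqs).1 ind [v] res
          = pvKahn fuel (pvSt seqs).1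
              (((pvSt seqs).1.getD v []).foldl (fun st x =>
                let ind2 := st.1.insert x (st.1.getD x 0 - 1)
                if ind2.getD x 0 == 0 then (ind2, st.2 ++ [x]) else (ind2, st.2))
                (ind, ([] : List Int))).1
              (((pvSt seqs).1.getD v []).foldl (fun st x =>
                let ind2 := st.1.insert x (st.1.getD x 0 - 1)
                if ind2.getD x 0 == 0 then (ind2, st.2 ++ [x]) else (ind2, st.2))
                (ind, ([] : List Int))).2
              (res ++ [v]) := by
        rw [pvKahn, if_pos hq1]
        rfl
      rw [hunf]
      exact ih _ _ _ (pvKInv_step h)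
    · have hunf : pvKahn (fuel + 1) (pvSt seqs).1 ind q res = res := by
        rw [pvKahn, if_neg hq1]
      rw [hunf]
      obtain ⟨ha, hb, hq, hc, hd, he, hf, hg, hh⟩ := h
      exact ⟨ha, hb, he, hf⟩

-- ---- completeness: under pvC the loop reproduces org ----
lemma pvFiltSplit {α : Type} (l : List α) (p q : α → Bool) :
    (l.filter p).length
      = (l.filter (fun a => p a && q a)).length + (l.filter (fun a => p a && !q a)).length := by
  induction l with
  | nil => simp
  | cons a t ih =>
    simp only [List.filter_cons]
    rcases hp : p a with _ | _
    · rw [if_neg (by simp [hp]), if_neg (by simp [hp]), if_neg (by simp [hp])]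
      exact ih
    · rcases hq : q a with _ | _
      · rw [if_pos (by simp [hp]), if_neg (by simp [hp, hq]), if_pos (by simp [hp, hq])]
        simp only [List.length_cons]
        omega
      · rw [if_pos (by simp [hp]), if_pos (by simp [hp, hq]), if_neg (by simp [hp, hq])]
        simp only [List.length_cons]
        omega

lemma pvMemTake {org : List Int} (hnd : org.Nodup) {x : Int} (hx : x ∈ org) (k : Nat) :
    x ∈ org.take k ↔ org.idxOf x < k := by
  constructor
  · intro h
    rcases List.mem_iff_getElem.1 h with ⟨j, hj, hgj⟩
    have hjk : j < k := by
      have := hj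
      simp only [List.length_take] at this
      omega
    have hjl : j < org.length := by
      have := hj
      simp only [List.length_take] at this
      omega
    have : org[j] = x := by rw [← List.getElem_take (h := hj)]; exact hgj
    rw [← this, List.Nodup.idxOf_getElem hnd j hjl]
    exact hjk
  · intro h
    have hlt := List.idxOf_lt_length_of_mem hx
    have hjt : org.idxOf x < (org.take k).length := by
      simp only [List.length_take]
      omega
    have := List.getElem_mem hjt
    rw [List.getElem_take] at this
    rwa [List.getElem_idxOf hlt] at this

lemma pvKahn_step_eq (fuel : Nat) (g : PySem.Dict Int (List Int)) (ind : PySem.Dict Int Int)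
    (v : Int) (res : List Int) :
    pvKahn (fuel + 1) g ind [v] res
      = pvKahn fuel g
          ((g.getD v []).foldl (fun st x =>
            let ind2 := st.1.insert x (st.1.getD x 0 - 1)
            if ind2.getD x 0 == 0 then (ind2, st.2 ++ [x]) else (ind2, st.2))
            (ind, ([] : List Int))).1
          ((g.getD v []).foldl (fun st x =>
            let ind2 := st.1.insert x (st.1.getD x 0 - 1)
            if ind2.getD x 0 == 0 then (ind2, st.2 ++ [x]) else (ind2, st.2))
            (ind, ([] : List Int))).2
          (res ++ [v]) := by
  rw [pvKahn, if_pos (by simp : ([v] : List Int).length = 1)]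
  rfl

lemma pvIdxOf_inj {org : List Int} {a b : Int} (ha : a ∈ org) (hb : b ∈ org)
    (h : org.idxOf a = org.idxOf b) : a = b := by
  have h1 : org[org.idxOf a]? = some a := by
    rw [List.getElem?_eq_getElem (List.idxOf_lt_length_of_mem ha), List.getElem_idxOf]
  have h2 : org[org.idxOf b]? = some b := by
    rw [List.getElem?_eq_getElem (List.idxOf_lt_length_of_mem hb), List.getElem_idxOf]
  rw [h, h2] at h1
  injection h1 with h1
  exact h1.symm

lemma pvKahn_complete (org : List Int) (seqs : List (List Int)) (hC : pvC org seqs) :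
    ∀ (fuel k : Nat) (ind : PySem.Dict Int Int) (q : List Int), k ≤ org.length →
      org.length - k < fuel →
      (∀ y, ind.getD y 0 = (pvDeg seqs y : Int) - (pvCnt seqs (org.take k) y : Int)) →
      q = (if k < org.length then [org.getD k 0] else []) →
      pvKahn fuel (pvSt seqs).1 ind q (org.take k) = org := by
  obtain ⟨hlen, hnd, hmem, hidx, hwit⟩ := hC
  have hSorg : ∀ x, x ∈ pvS seqs ↔ x ∈ org := by
    have hsub : pvS seqs ⊆ org := fun x hx => hmem x ((PySem.Set.mem_ofList _ _).1 hx)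
    have hperm : (pvS seqs).Perm org :=
      (List.subperm_of_subset (pvS_nodup seqs) hsub).perm_of_length_le (by omega)
    exact fun x => hperm.mem_iff
  have hedge_idx : ∀ x y, pvEdge seqs x y = true → org.idxOf x < org.idxOf y := by
    intro x y h
    exact hidx (x, y) (of_decide_eq_true h)
  have hedge_mem : ∀ x y, pvEdge seqs x y = true → x ∈ org ∧ y ∈ org := by
    intro x y h
    have := pvEdge_mem_S h
    exact ⟨(hSorg x).1 this.1, (hSorg y).1 this.2⟩
  intro fuel
  induction fuel with
  | zero =>
    intro k ind q hk hfuel hind hq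
    omega
  | succ fuel ih =>
    intro k ind q hk hfuel hind hq
    by_cases hklt : k < org.length
    · rw [hq, if_pos hklt]
      set v := org.getD k 0 with hv
      have hvk : org[k]'hklt = v := (pvGetD_eq_getElem hklt).symm
      have hvmem : v ∈ org := by rw [← hvk]; exact List.getElem_mem hklt
      have hvS : v ∈ pvS seqs := (hSorg v).2 hvmem
      have hvidx : org.idxOf v = k := by rw [← hvk]; exact List.Nodup.idxOf_getElem hnd k hklt
      have hvtake : v ∉ org.take k := by
        rw [pvMemTake hnd hvmem k, hvidx]
        omega
      have htake : org.take (k + 1) = org.take k ++ [v] := by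
        rw [List.take_succ_eq_append_getElem hklt, hvk]
      rw [pvKahn_step_eq]
      have hNnd := pvG_nodup seqs v
      have hNmem := pvG_mem seqs v
      rcases pvDecFold ((pvSt seqs).1.getD v []) hNnd ind [] with ⟨hi1, hi2⟩
      simp only [List.nil_append] at hi2
      -- characterize the value of ind at any y after the decrement
      have hval : ∀ y, y ∈ org → ((ind.getD y 0 == 1) = true ↔
          pvDeg seqs y = pvCnt seqs (org.take k) y + 1) := by
        intro y hy
        rw [hind y]
        have := pvCnt_le_deg seqs (org.take k) y
        constructor
        · intro h
          have h2 : (pvDeg seqs y : Int) - (pvCnt seqs (org.take k) y : Int) = 1 := by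
            simpa using h
          omega
        · intro h
          have : (pvDeg seqs y : Int) - (pvCnt seqs (org.take k) y : Int) = 1 := by
            push_cast [h]
            ring
          simp [this]
      -- the missing-predecessor count
      have hsplit : ∀ y, pvDeg seqs y
          = pvCnt seqs (org.take k) y
            + ((pvS seqs).filter (fun x => pvEdge seqs x y && !decide (x ∈ org.take k))).length := by
        intro y
        exact pvFiltSplit (pvS seqs) (fun x => pvEdge seqs x y) (fun x => decide (x ∈ org.take k))
      -- the new queue
      have hq' : ((pvSt seqs).1.getD v []).filter (fun y => ind.getD y 0 == 1)
          = (if k + 1 < org.length then [org.getD (k+1) 0] else []) := by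
        by_cases hk1 : k + 1 < org.length
        · rw [if_pos hk1]
          set c := org.getD (k+1) 0 with hc
          have hck : org[k+1]'hk1 = c := (pvGetD_eq_getElem hk1).symm
          have hcmem : c ∈ org := by rw [← hck]; exact List.getElem_mem hk1
          have hcidx : org.idxOf c = k + 1 := by
            rw [← hck]; exact List.Nodup.idxOf_getElem hnd (k+1) hk1
          have hcN : c ∈ (pvSt seqs).1.getD v [] := by
            rw [hNmem]
            have := hwit k hk1
            unfold pvEdge
            exact decide_eq_true this
          apply pvFiltSingleton _ hNnd c hcN
          intro y hyN
          have hey : pvEdge seqs v y = true := (hNmem y).1 hyN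
          have hymem : y ∈ org := (hedge_mem v y hey).2
          have hyidx : k < org.idxOf y := by
            have := hedge_idx v y hey
            omega
          rw [hval y hymem]
          constructor
          · intro h1
            -- exactly one predecessor outside take k forces idxOf y = k+1
            by_contra hyc
            have hjy : k + 1 < org.idxOf y := by
              rcases Nat.lt_or_ge (k+1) (org.idxOf y) with h | h
              · exact h
              · exfalso
                apply hyc
                have heq : org.idxOf y = org.idxOf c := by rw [hcidx]; omega
                exact pvIdxOf_inj hymem hcmem heq
            -- both v and org[idxOf y - 1] are predecessors of y outside take k
            have hsplity := hsplit y
            have hm : 2 ≤ ((pvS seqs).filter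
                (fun x => pvEdge seqs x y && !decide (x ∈ org.take k))).length := by
              set j := org.idxOf y with hj
              have hjl : j < org.length := List.idxOf_lt_length_of_mem hymem
              have hyj : org.getD j 0 = y := by
                rw [pvGetD_eq_getElem hjl]
                exact List.getElem_idxOf hjl
              have hw := hwit (j - 1) (by omega)
              have hjj : j - 1 + 1 = j := by omega
              rw [hjj, hyj] at hw
              have hpredw : pvEdge seqs (org.getD (j-1) 0) y = true := decide_eq_true hw
              have hwmem : org.getD (j-1) 0 ∈ org := by
                rw [pvGetD_eq_getElem (by omega : j - 1 < org.length)]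
                exact List.getElem_mem (by omega)
              have hwidx : org.idxOf (org.getD (j-1) 0) = j - 1 := by
                rw [pvGetD_eq_getElem (by omega : j - 1 < org.length)]
                exact List.Nodup.idxOf_getElem hnd (j-1) (by omega)
              apply pvFiltTwo _ _ (org.getD (j-1) 0) v
              · intro hvw
                have : org.idxOf (org.getD (j-1) 0) = org.idxOf v := by rw [hvw]
                rw [hwidx, hvidx] at this
                omega
              · rw [List.mem_filter]
                refine ⟨(pvEdge_mem_S hpredw).1, ?_⟩
                rw [hpredw]
                simp only [Bool.true_and, Bool.not_eq_eq_eq_not, Bool.not_true,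
                  decide_eq_false_iff_not]
                rw [pvMemTake hnd hwmem k, hwidx]
                omega
              · rw [List.mem_filter]
                refine ⟨hvS, ?_⟩
                rw [hey]
                simp only [Bool.true_and, Bool.not_eq_eq_eq_not, Bool.not_true,
                  decide_eq_false_iff_not]
                exact hvtake
            omega
          · intro hyc
            rw [hyc]
            -- every predecessor of c except v lies inside take k
            have hone : ((pvS seqs).filter
                (fun x => pvEdge seqs x c && !decide (x ∈ org.take k))).length = 1 := by
              have : (pvS seqs).filter (fun x => pvEdge seqs x c && !decide (x ∈ org.take k))
                  = [v] := by
                apply pvFiltSingleton _ (pvS_nodup seqs) v hvS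
                intro x hxS
                constructor
                · intro hx
                  rcases Bool.and_eq_true_iff.1 hx with ⟨hxe, hxnt⟩
                  have hxmem : x ∈ org := (hedge_mem x c hxe).1
                  have hxidx := hedge_idx x c hxe
                  rw [hcidx] at hxidx
                  have hxnt' : x ∉ org.take k := by
                    simpa using hxnt
                  rw [pvMemTake hnd hxmem k] at hxnt'
                  have heq : org.idxOf x = org.idxOf v := by rw [hvidx]; omega
                  exact pvIdxOf_inj hxmem hvmem heq
                · rintro rfl
                  have hvy : pvEdge seqs v c = true := by
                    have := hwit k hk1
                    unfold pvEdge
                    exact decide_eq_true this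
                  rw [hvy]
                  simp only [Bool.true_and, Bool.not_eq_eq_eq_not, Bool.not_true,
                    decide_eq_false_iff_not]
                  exact hvtake
              rw [this]
              rfl
            have := hsplit c
            omega
        · rw [if_neg hk1]
          have hN0 : (pvSt seqs).1.getD v [] = [] := by
            rw [List.eq_nil_iff_forall_not_mem]
            intro y hy
            have hey : pvEdge seqs v y = true := (hNmem y).1 hy
            have := hedge_idx v y hey
            have hymem := (hedge_mem v y hey).2
            have := List.idxOf_lt_length_of_mem hymem
            rw [hvidx] at *
            omega
          rw [hN0]
          rfl
      -- new indeg state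
      have hind' : ∀ y, (((pvSt seqs).1.getD v []).foldl (fun st x =>
            let ind2 := st.1.insert x (st.1.getD x 0 - 1)
            if ind2.getD x 0 == 0 then (ind2, st.2 ++ [x]) else (ind2, st.2))
            (ind, ([] : List Int))).1.getD y 0
          = (pvDeg seqs y : Int) - (pvCnt seqs (org.take (k+1)) y : Int) := by
        intro y
        rw [hi1 y, hind y, htake, pvCnt_append seqs hvS hvtake y]
        by_cases hy : pvEdge seqs v y = true
        · rw [if_pos ((hNmem y).2 hy), if_pos hy]
          push_cast
          ring
        · rw [if_neg (fun hc2 => hy ((hNmem y).1 hc2)), if_neg hy]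
          push_cast
          ring
      have hq2 : (((pvSt seqs).1.getD v []).foldl (fun st x =>
            let ind2 := st.1.insert x (st.1.getD x 0 - 1)
            if ind2.getD x 0 == 0 then (ind2, st.2 ++ [x]) else (ind2, st.2))
            (ind, ([] : List Int))).2 = (if k + 1 < org.length then [org.getD (k+1) 0] else []) := by
        rw [hi2]
        exact hq'
      have hres' := ih (k+1) (((pvSt seqs).1.getD v []).foldl (fun st x =>
            let ind2 := st.1.insert x (st.1.getD x 0 - 1)
            if ind2.getD x 0 == 0 then (ind2, st.2 ++ [x]) else (ind2, st.2))
            (ind, ([] : List Int))).1 (((pvSt seqs).1.getD v []).foldl (fun st x =>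
            let ind2 := st.1.insert x (st.1.getD x 0 - 1)
            if ind2.getD x 0 == 0 then (ind2, st.2 ++ [x]) else (ind2, st.2))
            (ind, ([] : List Int))).2 (by omega) (by omega) hind' hq2
      rw [← htake]
      exact hres'
    · have hkeq : k = org.length := by omega
      rw [hq, if_neg hklt, pvKahn, if_neg (by simp)]
      rw [hkeq, List.take_of_length_le (le_refl _)]

-- ---- assembling A's port ----
lemma pvKInv_init (seqs : List (List Int)) :
    pvKInv seqs (pvSt seqs).2
      ((pvSt seqs).2.keys.filter (fun k => (pvSt seqs).2.getD k 0 == 0)) [] := by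
  refine ⟨List.nodup_nil, by simp, ?_, ?_, ?_, ?_, ?_, Or.inl rfl, by simp⟩
  · intro y hy
    rcases List.mem_filter.1 hy with ⟨hk, _⟩
    rw [pvInd_keys] at hk
    exact ⟨hk, by simp⟩
  · intro y
    rw [pvInd_getD, pvCnt_nil]
    push_cast
    ring
  · intro y hy
    rcases List.mem_filter.1 hy with ⟨_, h0⟩
    rw [pvInd_getD seqs y] at h0
    have h0' : (pvDeg seqs y : Int) = 0 := by simpa using h0
    rw [pvCnt_nil]
    exact_mod_cast h0'
  · intro x y _ hy
    simp at hy
  · intro i hi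
    simp at hi

lemma pvA_run {org : List Int} {seqs : List (List Int)}
    (hg : (pvS seqs).length = org.length) :
    seqReconstruction org seqs =
      (pvKahn ((pvS seqs).length + 1) (pvSt seqs).1 (pvSt seqs).2
        ((pvSt seqs).2.keys.filter (fun k => (pvSt seqs).2.getD k 0 == 0)) [] == org) := by
  unfold seqReconstruction
  rw [if_neg (fun hc => hc hg)]
  rw [pvSt, pvP, List.foldl_flatMap, pvIndeg0, pvS, pvXs]

lemma pvA_false {org : List Int} {seqs : List (List Int)}
    (hg : (pvS seqs).length ≠ org.length) : seqReconstruction org seqs = false := by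
  unfold seqReconstruction
  exact if_pos hg

theorem pvA_iff (org : List Int) (seqs : List (List Int)) :
    seqReconstruction org seqs = true ↔ pvC org seqs := by
  by_cases hg : (pvS seqs).length = org.length
  · rw [pvA_run hg, beq_iff_eq]
    constructor
    · intro hres
      rcases pvKahn_sound seqs ((pvS seqs).length + 1) (pvSt seqs).2 _ [] (pvKInv_init seqs)
        with ⟨snd, smem, sedge, sadj⟩
      rw [hres] at snd smem sedge sadj
      have hperm : org.Perm (pvS seqs) :=
        (List.subperm_of_subset snd smem).perm_of_length_le (by omega)
      have hSsub : ∀ x ∈ pvS seqs, x ∈ org := fun x hx => hperm.symm.subset hx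
      refine ⟨hg, snd, ?_, ?_, ?_⟩
      · intro x hx
        exact hSsub x ((PySem.Set.mem_ofList _ _).2 hx)
      · intro p hp
        have hpe : pvEdge seqs p.1 p.2 = true := decide_eq_true hp
        have hpmem : p.2 ∈ org := hSsub _ (pvEdge_mem_S hpe).2
        exact (sedge p.1 p.2 hpe hpmem).2
      · intro i hi
        exact of_decide_eq_true (sadj i hi)
    · intro hC
      obtain ⟨hlen, hnd, hmem, hidx, hwit⟩ := hC
      have hSorg : ∀ x, x ∈ pvS seqs ↔ x ∈ org := by
        have hsub : pvS seqs ⊆ org := fun x hx => hmem x ((PySem.Set.mem_ofList _ _).1 hx)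
        have hperm : (pvS seqs).Perm org :=
          (List.subperm_of_subset (pvS_nodup seqs) hsub).perm_of_length_le (by omega)
        exact fun x => hperm.mem_iff
      have hq0 : (pvSt seqs).2.keys.filter (fun k => (pvSt seqs).2.getD k 0 == 0)
          = (if 0 < org.length then [org.getD 0 0] else []) := by
        by_cases h0 : 0 < org.length
        · rw [if_pos h0, pvInd_keys]
          have hc0 : org.getD 0 0 = org[0]'h0 := pvGetD_eq_getElem h0
          have hcmem : org.getD 0 0 ∈ org := by rw [hc0]; exact List.getElem_mem h0
          have hcidx : org.idxOf (org.getD 0 0) = 0 := by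
            rw [hc0]; exact List.Nodup.idxOf_getElem hnd 0 h0
          apply pvFiltSingleton _ (pvS_nodup seqs) _ ((hSorg _).2 hcmem)
          intro y hyS
          rw [pvInd_getD seqs y]
          constructor
          · intro hdy
            have hdy0 : pvDeg seqs y = 0 := by
              have : (pvDeg seqs y : Int) = 0 := by simpa using hdy
              exact_mod_cast this
            have hymem : y ∈ org := (hSorg y).1 hyS
            by_contra hne
            have hj0 : 0 < org.idxOf y := by
              rcases Nat.eq_zero_or_pos (org.idxOf y) with hj | hj
              · exfalso
                exact hne (pvIdxOf_inj hymem hcmem (by rw [hcidx, hj]))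
              · exact hj
            set j := org.idxOf y with hj
            have hjl : j < org.length := List.idxOf_lt_length_of_mem hymem
            have hyj : org.getD j 0 = y := by
              rw [pvGetD_eq_getElem hjl]
              exact List.getElem_idxOf hjl
            have hw := hwit (j - 1) (by omega)
            have hjj : j - 1 + 1 = j := by omega
            rw [hjj, hyj] at hw
            have hpredw : pvEdge seqs (org.getD (j-1) 0) y = true := decide_eq_true hw
            have hmemf : org.getD (j-1) 0 ∈ (pvS seqs).filter (fun x => pvEdge seqs x y) := by
              rw [List.mem_filter]
              exact ⟨(pvEdge_mem_S hpredw).1, hpredw⟩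
            have : 0 < pvDeg seqs y := List.length_pos_of_mem hmemf
            omega
          · intro hyc
            rw [hyc]
            have hd0 : pvDeg seqs (org.getD 0 0) = 0 := by
              unfold pvDeg
              have : (pvS seqs).filter (fun x => pvEdge seqs x (org.getD 0 0)) = [] := by
                rw [List.filter_eq_nil_iff]
                intro x hxS hxe
                have := hidx (x, org.getD 0 0) (of_decide_eq_true hxe)
                simp only at this
                rw [hcidx] at this
                omega
              rw [this]
              rfl
            rw [hd0]
            rfl
        · rw [if_neg h0]
          have hS0 : pvS seqs = [] := by
            apply List.eq_nil_iff_length_eq_zero.2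
            omega
          rw [pvInd_keys, hS0]
          rfl
      have hind0 : ∀ y, (pvSt seqs).2.getD y 0
          = (pvDeg seqs y : Int) - (pvCnt seqs (org.take 0) y : Int) := by
        intro y
        rw [pvInd_getD]
        simp [pvCnt_nil]
      have hrun := pvKahn_complete org seqs ⟨hlen, hnd, hmem, hidx, hwit⟩
        ((pvS seqs).length + 1) 0 (pvSt seqs).2 _ (by omega) (by omega) hind0 hq0
      simpa using hrun
  · rw [pvA_false hg]
    simp only [Bool.false_eq_true, false_iff]
    rintro ⟨hlen, -⟩
    exact hg hlen

-- ===== VERDICT (by name: the statement is the Claim_ definition above) =====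
theorem seqReconstruction_spec : Claim_equal_seqReconstruction := by
  intro org seqs _
  unfold Spec_seqReconstruction
  have hA := pvA_iff org seqs
  have hB := pvB_iff org seqs
  rcases h1 : seqReconstruction org seqs with _ | _
  · rcases h2 : seqReconstruction_alt org seqs with _ | _
    · rfl
    · exfalso
      rw [h1] at hA
      rw [h2] at hB
      have := hA.2 (hB.1 rfl)
      simp at this
  · rw [h1] at hA
    exact (hB.2 (hA.1 rfl)).symm
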